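-- pv_equiv track=rewrite | github.com/Michael-Sebero/Numerology-Calculator | numerology_calculator.py | get_creative_grounded_vacillating_totals
-- ===== SOURCE A (Python) =====
-- def get_letter_value(letter):
--     """Convert letter to numerological value using Pythagorean system"""
--     letter_values = {
--         'A': 1, 'B': 2, 'C': 3, 'D': 4, 'E': 5, 'F': 6, 'G': 7, 'H': 8, 'I': 9,
--         'J': 1, 'K': 2, 'L': 3, 'M': 4, 'N': 5, 'O': 6, 'P': 7, 'Q': 8, 'R': 9,
--         'S': 1, 'T': 2, 'U': 3, 'V': 4, 'W': 5, 'X': 6, 'Y': 7, 'Z': 8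
--     }
--     return letter_values.get(letter.upper(), 0)
--
-- def reduce_to_single_digit(number):
--     """Reduce number to single digit, preserving master numbers 11, 22, 33"""
--     if number in [11, 22, 33]:
--         return number
--
--     while number > 9:
--         number = sum(int(digit) for digit in str(number))
--         if number in [11, 22, 33]:
--             return number
--
--     return number
--
-- def get_creative_grounded_vacillating_totals(name):
--     """Calculate totals for Creative, Vacillating, and Grounded letters"""
--     name = name.upper().replace(' ', '')
--
--     # Based on the official chart from numerology.center - corrected categorization
--     creative_letters = 'EAIORZK'      # E, A, I, O, R, Z, K
--     vacillating_letters = 'WHJNPBSTXFQUY'  # W, H, J, N, P, B, S, T, X, F, Q, U, Y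
--     grounded_letters = 'DMGLCV'       # D, M, G, L, C, V
--
--     creative_total = sum(get_letter_value(letter) for letter in name if letter in creative_letters)
--     vacillating_total = sum(get_letter_value(letter) for letter in name if letter in vacillating_letters)
--     grounded_total = sum(get_letter_value(letter) for letter in name if letter in grounded_letters)
--
--     return {
--         'creative': reduce_to_single_digit(creative_total),
--         'vacillating': reduce_to_single_digit(vacillating_total),
--         'grounded': reduce_to_single_digit(grounded_total)
--     }
-- ===== SOURCE B (Python) =====
-- def get_letter_value(letter):
--     """Convert letter to numerological value using Pythagorean system"""
--     letter_values = {
--         'A': 1, 'B': 2, 'C': 3, 'D': 4, 'E': 5, 'F': 6, 'G': 7, 'H': 8, 'I': 9,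
--         'J': 1, 'K': 2, 'L': 3, 'M': 4, 'N': 5, 'O': 6, 'P': 7, 'Q': 8, 'R': 9,
--         'S': 1, 'T': 2, 'U': 3, 'V': 4, 'W': 5, 'X': 6, 'Y': 7, 'Z': 8
--     }
--     return letter_values.get(letter.upper(), 0)
--
-- def reduce_to_single_digit(number):
--     """Reduce number to single digit, preserving master numbers 11, 22, 33"""
--     if number in [11, 22, 33]:
--         return number
--     while number > 9:
--         number = sum(int(digit) for digit in str(number))
--         if number in [11, 22, 33]:
--             return number
--     return number
--
-- # letter -> category lookup table, built once from the three category strings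
-- _CATEGORY = {letter: cat
--              for cat, letters in (('creative', 'EAIORZK'),
--                                   ('vacillating', 'WHJNPBSTXFQUY'),
--                                   ('grounded', 'DMGLCV'))
--              for letter in letters}
--
-- def get_creative_grounded_vacillating_totals(name):
--     """Calculate totals for Creative, Vacillating, and Grounded letters"""
--     name = name.upper().replace(' ', '')
--     totals = {'creative': 0, 'vacillating': 0, 'grounded': 0}
--     for letter in name:
--         cat = _CATEGORY.get(letter)
--         if cat is not None:
--             totals[cat] += get_letter_value(letter)
--     return {cat: reduce_to_single_digit(total) for cat, total in totals.items()}
-- ===== Notes on version B (the rewrite author's own statement) =====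
-- stated objective: idiomatic
-- what changed: Replaced the three separate filtered-sum passes over the name by one precomputed letter-to-category lookup table and a single pass that accumulates all three category totals at once.
import Mathlib
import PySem

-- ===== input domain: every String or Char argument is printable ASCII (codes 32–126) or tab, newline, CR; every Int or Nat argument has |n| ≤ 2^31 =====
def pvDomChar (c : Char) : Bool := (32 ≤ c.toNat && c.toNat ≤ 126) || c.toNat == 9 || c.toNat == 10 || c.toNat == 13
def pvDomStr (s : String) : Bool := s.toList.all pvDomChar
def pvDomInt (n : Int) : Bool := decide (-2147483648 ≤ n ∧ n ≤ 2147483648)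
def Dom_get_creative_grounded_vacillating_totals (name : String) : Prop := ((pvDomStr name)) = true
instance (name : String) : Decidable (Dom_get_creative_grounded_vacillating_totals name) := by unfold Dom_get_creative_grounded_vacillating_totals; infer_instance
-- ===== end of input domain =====

-- B replaces A's three filtered-sum passes over the name by one precomputed
-- letter→category lookup table and a single pass accumulating all three totals.

-- ===== PORT A =====
-- shared helper get_letter_value (identical in Source A and Source B)
def letterValues : PySem.Dict Char Int := PySem.Dict.ofList
  [('A',1),('B',2),('C',3),('D',4),('E',5),('F',6),('G',7),('H',8),('I',9),
   ('J',1),('K',2),('L',3),('M',4),('N',5),('O',6),('P',7),('Q',8),('R',9),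
   ('S',1),('T',2),('U',3),('V',4),('W',5),('X',6),('Y',7),('Z',8)]

def get_letter_value (c : Char) : Int :=
  letterValues.getD (PySem.Chars.upperChar c) 0

-- shared helper reduce_to_single_digit (identical in Source A and Source B).
-- sum(int(digit) for digit in str(number)): int(d) = d.toNat - 48 is exact for the
-- digit characters str(number) yields when number ≥ 0 (the loop body only runs for number > 9).
def digitSum (n : Int) : Int :=
  (PySem.Int.toChars n).foldl (fun a c => a + ((c.toNat : Int) - 48)) 0

-- the while loop, fuel-bounded: each iteration strictly shrinks number (the digit sum of
-- n ≥ 10 is < n), so n.toNat units of fuel are more than the loop can ever consume.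
def reduceLoop : Nat → Int → Int
  | 0, n => n
  | fuel + 1, n =>
    if n > 9 then
      let m := digitSum n
      if m = 11 ∨ m = 22 ∨ m = 33 then m else reduceLoop fuel m
    else n

def reduce_to_single_digit (n : Int) : Int :=
  if n = 11 ∨ n = 22 ∨ n = 33 then n else reduceLoop n.toNat n

-- A: upper-case, drop spaces, then three independent filtered-sum passes over the name
def get_creative_grounded_vacillating_totals (name : String) : List (String × Int) :=
  let nm := (PySem.Str.replace (PySem.Str.upper name) " " "").toList
  let creative_letters := "EAIORZK".toList      -- 'letter in creative_letters': char membership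
  let vacillating_letters := "WHJNPBSTXFQUY".toList
  let grounded_letters := "DMGLCV".toList
  let creative_total := nm.foldl (fun acc c => if c ∈ creative_letters then acc + get_letter_value c else acc) 0
  let vacillating_total := nm.foldl (fun acc c => if c ∈ vacillating_letters then acc + get_letter_value c else acc) 0
  let grounded_total := nm.foldl (fun acc c => if c ∈ grounded_letters then acc + get_letter_value c else acc) 0
  [("creative", reduce_to_single_digit creative_total),
   ("vacillating", reduce_to_single_digit vacillating_total),
   ("grounded", reduce_to_single_digit grounded_total)]

-- ===== PORT B =====
-- _CATEGORY: letter → category, built once from the three category strings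
def categoryTable : PySem.Dict Char String := PySem.Dict.ofList
  ("EAIORZK".toList.map (fun c => (c, "creative"))
   ++ "WHJNPBSTXFQUY".toList.map (fun c => (c, "vacillating"))
   ++ "DMGLCV".toList.map (fun c => (c, "grounded")))

-- the totals dict has the three fixed keys creative/vacillating/grounded: a triple
def get_creative_grounded_vacillating_totals_alt (name : String) : List (String × Int) :=
  let nm := (PySem.Str.replace (PySem.Str.upper name) " " "").toList
  let totals := nm.foldl (fun (acc : Int × Int × Int) c =>
      match categoryTable.get? c with
      | some cat =>
        if cat = "creative" then (acc.1 + get_letter_value c, acc.2.1, acc.2.2)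
        else if cat = "vacillating" then (acc.1, acc.2.1 + get_letter_value c, acc.2.2)
        else (acc.1, acc.2.1, acc.2.2 + get_letter_value c)
      | none => acc) ((0 : Int), (0 : Int), (0 : Int))
  [("creative", reduce_to_single_digit totals.1),
   ("vacillating", reduce_to_single_digit totals.2.1),
   ("grounded", reduce_to_single_digit totals.2.2)]

-- ===== PRECONDITION & SPEC =====
def Spec_get_creative_grounded_vacillating_totals (name : String) (out : List (String × Int)) : Prop := out = get_creative_grounded_vacillating_totals_alt name
instance (name : String) (out : List (String × Int)) : Decidable (Spec_get_creative_grounded_vacillating_totals name out) := by unfold Spec_get_creative_grounded_vacillating_totals; infer_instance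

-- ===== CLAIM (what is proved, stated in full; the proofs are below) =====
def Claim_equal_get_creative_grounded_vacillating_totals : Prop := ∀ (name : String), Dom_get_creative_grounded_vacillating_totals name → Spec_get_creative_grounded_vacillating_totals name (get_creative_grounded_vacillating_totals name)

-- ===== LEMMAS AND PROOFS =====
-- proof-only abbreviations for the category letter lists and the table's item list
def creL : List Char := ['E','A','I','O','R','Z','K']
def vacL : List Char := ['W','H','J','N','P','B','S','T','X','F','Q','U','Y']
def groL : List Char := ['D','M','G','L','C','V']
def catItems : List (Char × String) :=
  [('E',"creative"),('A',"creative"),('I',"creative"),('O',"creative"),('R',"creative"),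
   ('Z',"creative"),('K',"creative"),
   ('W',"vacillating"),('H',"vacillating"),('J',"vacillating"),('N',"vacillating"),
   ('P',"vacillating"),('B',"vacillating"),('S',"vacillating"),('T',"vacillating"),
   ('X',"vacillating"),('F',"vacillating"),('Q',"vacillating"),('U',"vacillating"),('Y',"vacillating"),
   ('D',"grounded"),('M',"grounded"),('G',"grounded"),('L',"grounded"),('C',"grounded"),('V',"grounded")]

theorem creL_eq : "EAIORZK".toList = creL := by decide
theorem vacL_eq : "WHJNPBSTXFQUY".toList = vacL := by decide
theorem groL_eq : "DMGLCV".toList = groL := by decide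
theorem keys_catTable : categoryTable.keys = catItems.map Prod.fst := by decide
theorem items_catTable : categoryTable.items = catItems := by decide

-- what each table entry says about the three category lists
theorem catItems_sound : ∀ p ∈ catItems,
    (p.2 = "creative" → p.1 ∈ creL ∧ p.1 ∉ vacL ∧ p.1 ∉ groL) ∧
    (p.2 = "vacillating" → p.1 ∉ creL ∧ p.1 ∈ vacL ∧ p.1 ∉ groL) ∧
    (p.2 ≠ "creative" → p.2 ≠ "vacillating" → p.1 ∉ creL ∧ p.1 ∉ vacL ∧ p.1 ∈ groL) := by
  intro p hp
  fin_cases hp <;> exact ⟨by decide, by decide, by decide⟩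

theorem creL_sub : ∀ x ∈ creL, x ∈ catItems.map Prod.fst := by
  intro x hx; fin_cases hx <;> decide

theorem vacL_sub : ∀ x ∈ vacL, x ∈ catItems.map Prod.fst := by
  intro x hx; fin_cases hx <;> decide

theorem groL_sub : ∀ x ∈ groL, x ∈ catItems.map Prod.fst := by
  intro x hx; fin_cases hx <;> decide

-- B's one step handles a character exactly as A's three per-category steps do
theorem step_eq (c : Char) (a b d : Int) :
    (match categoryTable.get? c with
      | some cat =>
        if cat = "creative" then (a + get_letter_value c, b, d)
        else if cat = "vacillating" then (a, b + get_letter_value c, d)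
        else (a, b, d + get_letter_value c)
      | none => ((a, b, d) : Int × Int × Int))
    = ((if c ∈ "EAIORZK".toList then a + get_letter_value c else a),
       (if c ∈ "WHJNPBSTXFQUY".toList then b + get_letter_value c else b),
       (if c ∈ "DMGLCV".toList then d + get_letter_value c else d)) := by
  rw [creL_eq, vacL_eq, groL_eq]
  cases hget : categoryTable.get? c with
  | none =>
    have hm : c ∉ catItems.map Prod.fst := by
      have h := hget
      rw [PySem.Dict.get?_eq_none_iff_not_mem_keys, keys_catTable] at h
      exact h
    have h1 : c ∉ creL := fun hx => hm (creL_sub c hx)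
    have h2 : c ∉ vacL := fun hx => hm (vacL_sub c hx)
    have h3 : c ∉ groL := fun hx => hm (groL_sub c hx)
    simp only [if_neg h1, if_neg h2, if_neg h3]
  | some cat =>
    have hmem : (c, cat) ∈ catItems := by
      have h := PySem.Dict.mem_items_of_get?_eq_some _ hget
      rwa [items_catTable] at h
    obtain ⟨hc, hv, hg⟩ := catItems_sound (c, cat) hmem
    by_cases h1 : cat = "creative"
    · obtain ⟨m1, m2, m3⟩ := hc h1
      simp only [if_pos h1, if_pos m1, if_neg m2, if_neg m3]
    · by_cases h2 : cat = "vacillating"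
      · obtain ⟨m1, m2, m3⟩ := hv h2
        simp only [if_neg h1, if_pos h2, if_neg m1, if_pos m2, if_neg m3]
      · obtain ⟨m1, m2, m3⟩ := hg h1 h2
        simp only [if_neg h1, if_neg h2, if_neg m1, if_neg m2, if_pos m3]

theorem fold3 (l : List Char) (a b d : Int) :
    l.foldl (fun (acc : Int × Int × Int) c =>
      match categoryTable.get? c with
      | some cat =>
        if cat = "creative" then (acc.1 + get_letter_value c, acc.2.1, acc.2.2)
        else if cat = "vacillating" then (acc.1, acc.2.1 + get_letter_value c, acc.2.2)
        else (acc.1, acc.2.1, acc.2.2 + get_letter_value c)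
      | none => acc) (a, b, d)
    = (l.foldl (fun acc c => if c ∈ "EAIORZK".toList then acc + get_letter_value c else acc) a,
       l.foldl (fun acc c => if c ∈ "WHJNPBSTXFQUY".toList then acc + get_letter_value c else acc) b,
       l.foldl (fun acc c => if c ∈ "DMGLCV".toList then acc + get_letter_value c else acc) d) := by
  induction l generalizing a b d with
  | nil => rfl
  | cons x xs ih =>
    simp only [List.foldl_cons]
    rw [step_eq]
    exact ih _ _ _

-- ===== VERDICT (by name: the statement is the Claim_ definition above) =====
theorem get_creative_grounded_vacillating_totals_spec : Claim_equal_get_creative_grounded_vacillating_totals := by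
  intro name _
  unfold Spec_get_creative_grounded_vacillating_totals
  unfold get_creative_grounded_vacillating_totals get_creative_grounded_vacillating_totals_alt
  simp only [fold3]
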